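-- pv_equiv track=rewrite | github.com/hwmaltby/project-euler | problems/problem_131.py | prime_cube_pairs
-- ===== SOURCE A (Python) =====
-- def sieve(n):
--     is_prime = [True] * n
--     is_prime[0], is_prime[1] = False, False
--     prms = []
--     for i in range(2, n):
--         if is_prime[i]:
--             prms.append(i)
--             for j in range(i*i, n, i):
--                 is_prime[j] = False
--     return prms
--
-- def prime_cube_pairs(n):
--     prms = set(sieve(n + 1))
--     incr = 6
--     test = 1
--     total = 0
--     while test <= n:
--         if test in prms:
--             total += 1
--         test += incr
--         incr += 6
--     return total
-- ===== SOURCE B (Python) =====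
-- def prime_cube_pairs(n):
--     def is_prime(m):
--         if m < 2:
--             return False
--         d = 2
--         while d * d <= m:
--             if m % d == 0:
--                 return False
--             d += 1
--         return True
--
--     total = 0
--     k = 1
--     while 3 * k * k + 3 * k + 1 <= n:
--         if is_prime(3 * k * k + 3 * k + 1):
--             total += 1
--         k += 1
--     return total
-- ===== Notes on version B (the rewrite author's own statement) =====
-- stated objective: faster
-- what changed: Instead of sieving all primes up to n and then walking the centered-hexagonal numbers testing set membership, B enumerates only the ~sqrt(n/3) candidates 3k^2+3k+1 directly and tests each for primality by trial division.
import Mathlib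
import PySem

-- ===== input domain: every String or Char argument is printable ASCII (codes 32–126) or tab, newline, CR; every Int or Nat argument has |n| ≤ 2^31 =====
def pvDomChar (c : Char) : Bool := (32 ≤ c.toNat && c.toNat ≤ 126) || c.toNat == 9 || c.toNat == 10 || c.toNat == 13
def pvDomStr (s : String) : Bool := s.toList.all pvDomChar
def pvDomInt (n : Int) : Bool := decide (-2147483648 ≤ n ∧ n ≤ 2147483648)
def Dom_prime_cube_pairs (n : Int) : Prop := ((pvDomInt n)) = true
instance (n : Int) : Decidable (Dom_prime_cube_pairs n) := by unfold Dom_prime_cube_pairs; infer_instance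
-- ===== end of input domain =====

-- B replaces A's full sieve of [0, n] by direct enumeration of the ~√(n/3) candidates
-- 3k²+3k+1 with a trial-division primality test each (measurably faster).

-- ===== PORT A =====
-- Loop body of the sieve's `for i in range(2, n)`; reading `is_prime[i]` is always
-- in range in Python (2 ≤ i < n) so `getD … false` is exact there, and `is_prime[j] = False`
-- (0 ≤ j < n) is `List.set` at `j.toNat`.
def pcpStepF (n : Int) (st : List Bool × List Int) (i : Int) : List Bool × List Int :=
  if st.1.getD i.toNat false then
    ((PySem.List.pyRange (i * i) n i).foldl (fun a j => a.set j.toNat false) st.1,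
     st.2 ++ [i])
  else st

-- Python's `is_prime[0] = is_prime[1] = False` raises IndexError when n < 2; those calls
-- are excluded by Pre_ (the entry calls sieve with n+1 ≥ 2), where `List.set` is exact.
def sieve (n : Int) : List Int :=
  (((PySem.List.pyRange 2 n 1).foldl (pcpStepF n)
      (((List.replicate n.toNat true).set 0 false).set 1 false, []))).2

-- A's `while test <= n` loop; the conjunct `1 ≤ incr` only makes the recursion total
-- (every reachable state has incr ≥ 6).
def pcpLoopA (prms : PySem.Set Int) (n test incr total : Int) : Int :=
  if h : test ≤ n ∧ 1 ≤ incr then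
    pcpLoopA prms n (test + incr) (incr + 6)
      (total + if PySem.Set.contains prms test then 1 else 0)
  else total
termination_by (n + 1 - test).toNat
decreasing_by omega

def prime_cube_pairs (n : Int) : Int :=
  pcpLoopA (PySem.Set.ofList (sieve (n + 1))) n 1 6 0

-- ===== PORT B =====
-- B's `while d*d <= m` trial-division loop; `2 ≤ d` is a totality guard (d starts at 2).
def pcpDivLoop (m d : Int) : Bool :=
  if h : d * d ≤ m ∧ 2 ≤ d then
    if PySem.Int.mod m d == 0 then false else pcpDivLoop m (d + 1)
  else true
termination_by (m - d).toNat
decreasing_by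
  have h2d : 2 * d ≤ d * d := by nlinarith [h.1, h.2]
  omega

def pcpIsPrime (m : Int) : Bool :=
  if m < 2 then false else pcpDivLoop m 2

-- B's `while 3*k*k + 3*k + 1 <= n` loop; `0 ≤ k` is a totality guard (k starts at 1).
def pcpLoopB (n k total : Int) : Int :=
  if h : 3 * k * k + 3 * k + 1 ≤ n ∧ 0 ≤ k then
    pcpLoopB n (k + 1) (total + if pcpIsPrime (3 * k * k + 3 * k + 1) then 1 else 0)
  else total
termination_by (n + 1 - k).toNat
decreasing_by
  have hk : k ≤ n := by nlinarith [h.1, h.2]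
  omega

def prime_cube_pairs_alt (n : Int) : Int := pcpLoopB n 1 0

-- ===== PRECONDITION & SPEC =====
-- A raises IndexError for n ≤ 0 (sieve(n+1) builds a bool list of length < 2 and writes index 1).
def Pre_prime_cube_pairs (n : Int) : Prop := 1 ≤ n
instance (n : Int) : Decidable (Pre_prime_cube_pairs n) := by unfold Pre_prime_cube_pairs; infer_instance
def pvWitness_prime_cube_pairs : Int := 7

def Spec_prime_cube_pairs (n : Int) (out : Int) : Prop := out = prime_cube_pairs_alt n
instance (n : Int) (out : Int) : Decidable (Spec_prime_cube_pairs n out) := by unfold Spec_prime_cube_pairs; infer_instance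

-- ===== CLAIM (what is proved, stated in full; the proofs are below) =====
def Claim_equal_prime_cube_pairs : Prop := ∀ (n : Int), Dom_prime_cube_pairs n → Pre_prime_cube_pairs n → Spec_prime_cube_pairs n (prime_cube_pairs n)

-- ===== LEMMAS AND PROOFS =====

-- "x has no divisor p with 2 ≤ p < x and p*p ≤ x" — what the sieve's bit at x means.
def pcpP (x : Int) : Prop := ∀ p : Int, 2 ≤ p → p < x → p * p ≤ x → p ∣ x → False

-- invariant after the outer sieve loop has processed all i ∈ [2, c)
def pcpSInv (n c : Int) (st : List Bool × List Int) : Prop :=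
  st.1.length = n.toNat ∧
  (∀ m : Int, 0 ≤ m → m < n →
      (st.1.getD m.toNat false = true ↔
        (2 ≤ m ∧ ∀ p : Int, 2 ≤ p → p < c → p * p ≤ m → p ∣ m → False))) ∧
  (∀ x : Int, x ∈ st.2 ↔ (2 ≤ x ∧ x < c ∧ pcpP x))

lemma pcp_getD_set_false (l : List Bool) (j m : Nat) :
    (l.set j false).getD m false = (l.getD m false && !(decide (m = j))) := by
  by_cases hmj : m = j
  · subst hmj
    by_cases hl : m < l.length
    · simp [List.getD_eq_getElem?_getD, hl]
    · simp [List.getD_eq_getElem?_getD, hl]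
  · simp [List.getD_eq_getElem?_getD, Ne.symm hmj, hmj]

lemma pcp_length_foldl_set (L : List Int) (l : List Bool) :
    (L.foldl (fun a j => a.set j.toNat false) l).length = l.length := by
  induction L generalizing l with
  | nil => rfl
  | cons j L ih => simp [List.foldl_cons, ih]

lemma pcp_foldl_set_getD (L : List Int) (hL : ∀ j ∈ L, 0 ≤ j) (l : List Bool)
    (m : Int) (hm : 0 ≤ m) :
    (L.foldl (fun a j => a.set j.toNat false) l).getD m.toNat false
      = (l.getD m.toNat false && !(decide (m ∈ L))) := by
  induction L generalizing l with
  | nil => simp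
  | cons j L ih =>
    have h0 : 0 ≤ j := hL j (by simp)
    rw [List.foldl_cons, ih (fun x hx => hL x (by simp [hx])), pcp_getD_set_false]
    have hd : (decide (m.toNat = j.toNat)) = decide (m = j) :=
      decide_eq_decide.mpr (by omega)
    simp [hd, List.mem_cons, Bool.and_assoc]

lemma pcp_init_getD (n m : Int) (hm : 0 ≤ m) (hmn : m < n) :
    (((List.replicate n.toNat true).set 0 false).set 1 false).getD m.toNat false
      = decide (2 ≤ m) := by
  rw [pcp_getD_set_false, pcp_getD_set_false]
  have hlt : m.toNat < n.toNat := by omega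
  simp only [List.getD_eq_getElem?_getD, List.getElem?_replicate, hlt, if_pos,
    Option.getD_some]
  by_cases h2 : 2 ≤ m
  · have h0 : m.toNat ≠ 0 := by omega
    have h1 : m.toNat ≠ 1 := by omega
    simp [h0, h1, h2]
  · have : m.toNat = 0 ∨ m.toNat = 1 := by omega
    rcases this with h | h <;> simp [h, h2]

lemma pcp_mem_mark (n c m : Int) (hc : 0 < c) (hmn : m < n) :
    m ∈ PySem.List.pyRange (c * c) n c ↔ (c * c ≤ m ∧ c ∣ m) := by
  rw [PySem.List.mem_pyRange_iff_of_pos hc]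
  constructor
  · rintro ⟨h1, _, h3⟩
    refine ⟨h1, ?_⟩
    have := dvd_add h3 ⟨c, rfl⟩
    simpa using this
  · rintro ⟨h1, h2⟩
    exact ⟨h1, hmn, dvd_sub h2 ⟨c, rfl⟩⟩

lemma pcp_step (n c : Int) (st : List Bool × List Int) (h2 : 2 ≤ c) (hcn : c < n)
    (hinv : pcpSInv n c st) : pcpSInv n (c + 1) (pcpStepF n st c) := by
  obtain ⟨hlen, harr, hprm⟩ := hinv
  have hc0 : (0 : Int) ≤ c := by omega
  have hcc : c ≤ c * c := by nlinarith
  unfold pcpStepF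
  by_cases ht : st.1.getD c.toNat false = true
  · rw [if_pos ht]
    obtain ⟨hc2, hcp⟩ := (harr c hc0 hcn).mp ht
    have hL : ∀ j ∈ PySem.List.pyRange (c * c) n c, (0 : Int) ≤ j := by
      intro j hj
      have h := (PySem.List.mem_pyRange_iff_of_pos (by omega) j).mp hj
      nlinarith [h.1]
    refine ⟨by simpa [pcp_length_foldl_set] using hlen, ?_, ?_⟩
    · intro m hm0 hmn
      rw [pcp_foldl_set_getD _ hL st.1 m hm0, Bool.and_eq_true, Bool.not_eq_true',
        decide_eq_false_iff_not]
      constructor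
      · rintro ⟨ha, hnm⟩
        obtain ⟨hm2, hmp⟩ := (harr m hm0 hmn).mp ha
        refine ⟨hm2, ?_⟩
        intro p hp hpc1 hpp hpd
        have hpc : p < c ∨ p = c := by omega
        rcases hpc with hlt | heq
        · exact hmp p hp hlt hpp hpd
        · subst heq
          exact hnm ((pcp_mem_mark n p m (by omega) hmn).mpr ⟨hpp, hpd⟩)
      · rintro ⟨hm2, hmp⟩
        refine ⟨(harr m hm0 hmn).mpr ⟨hm2, fun p hp hpc => hmp p hp (by omega)⟩, ?_⟩
        intro hmem
        obtain ⟨hle, hdv⟩ := (pcp_mem_mark n c m (by omega) hmn).mp hmem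
        exact hmp c hc2 (by omega) hle hdv
    · intro x
      simp only [List.mem_append, List.mem_singleton]
      constructor
      · rintro (hx | hx)
        · obtain ⟨a, b, d⟩ := (hprm x).mp hx
          exact ⟨a, by omega, d⟩
        · subst hx
          exact ⟨hc2, by omega, fun p hp hpx hpp hpd => hcp p hp hpx hpp hpd⟩
      · rintro ⟨hx2, hxc, hxp⟩
        by_cases hxlt : x < c
        · exact Or.inl ((hprm x).mpr ⟨hx2, hxlt, hxp⟩)
        · exact Or.inr (by omega)
  · rw [if_neg ht]
    have hw : ∃ p : Int, 2 ≤ p ∧ p < c ∧ p * p ≤ c ∧ p ∣ c := by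
      by_contra hno
      push_neg at hno
      exact ht ((harr c hc0 hcn).mpr
        ⟨h2, fun p hp hpc hpp hpd => hno p hp hpc hpp hpd⟩)
    obtain ⟨q, hq2, hqc, hqq, hqd⟩ := hw
    refine ⟨hlen, ?_, ?_⟩
    · intro m hm0 hmn
      rw [harr m hm0 hmn]
      constructor
      · rintro ⟨hm2, hmp⟩
        refine ⟨hm2, ?_⟩
        intro p hp hpc1 hpp hpd
        have hpc : p < c ∨ p = c := by omega
        rcases hpc with hlt | heq
        · exact hmp p hp hlt hpp hpd
        · subst heq
          exact hmp q hq2 hqc (by nlinarith) (dvd_trans hqd hpd)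
      · rintro ⟨hm2, hmp⟩
        exact ⟨hm2, fun p hp hpc => hmp p hp (by omega)⟩
    · intro x
      rw [hprm x]
      constructor
      · rintro ⟨a, b, d⟩
        exact ⟨a, by omega, d⟩
      · rintro ⟨a, b, d⟩
        refine ⟨a, ?_, d⟩
        have hx : x < c ∨ x = c := by omega
        rcases hx with h | h
        · exact h
        · exact absurd (d q hq2 (by omega) (by omega) (by rw [h]; exact hqd)) (by simp)

lemma pcp_outer (n : Int) :
    ∀ (fuel : Nat) (c : Int) (st : List Bool × List Int),
      (n - c).toNat ≤ fuel → 2 ≤ c → c ≤ n → pcpSInv n c st →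
      pcpSInv n n ((PySem.List.pyRange c n 1).foldl (pcpStepF n) st) := by
  intro fuel
  induction fuel with
  | zero =>
    intro c st hf h2 hcn hinv
    have hc : c = n := by omega
    subst hc
    rw [PySem.List.pyRange_one_eq_nil le_rfl]
    exact hinv
  | succ f ih =>
    intro c st hf h2 hcn hinv
    by_cases hlt : c < n
    · rw [PySem.List.pyRange_one_cons hlt, List.foldl_cons]
      exact ih (c + 1) _ (by omega) (by omega) (by omega) (pcp_step n c st h2 hlt hinv)
    · have hc : c = n := by omega
      subst hc
      rw [PySem.List.pyRange_one_eq_nil le_rfl]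
      exact hinv

lemma pcp_base (n : Int) (_hn : 2 ≤ n) :
    pcpSInv n 2 (((List.replicate n.toNat true).set 0 false).set 1 false, []) := by
  refine ⟨by simp, ?_, ?_⟩
  · intro m hm0 hmn
    rw [pcp_init_getD n m hm0 hmn]
    constructor
    · intro h
      exact ⟨of_decide_eq_true h, fun p hp hpc _ _ => by omega⟩
    · rintro ⟨h2, _⟩
      exact decide_eq_true h2
  · intro x
    simp only [List.not_mem_nil, false_iff]
    rintro ⟨h1, h2, _⟩
    omega

lemma pcp_sieve_mem (n : Int) (hn : 2 ≤ n) (x : Int) :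
    x ∈ sieve n ↔ (2 ≤ x ∧ x < n ∧ pcpP x) := by
  unfold sieve
  exact (pcp_outer n (n - 2).toNat 2 _ le_rfl le_rfl hn (pcp_base n hn)).2.2 x

lemma pcp_divLoop_iff (m : Int) :
    ∀ (fuel : Nat) (d : Int), (m - d).toNat ≤ fuel → 2 ≤ d →
      (pcpDivLoop m d = true ↔ ∀ e : Int, d ≤ e → e * e ≤ m → ¬ e ∣ m) := by
  intro fuel
  induction fuel with
  | zero =>
    intro d hf h2
    have h2d : 2 * d ≤ d * d := by nlinarith
    rw [pcpDivLoop, dif_neg (by omega : ¬(d * d ≤ m ∧ 2 ≤ d))]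
    simp only [true_iff]
    intro e he hee hdvd
    have h2e : 2 * e ≤ e * e := by nlinarith
    omega
  | succ f ih =>
    intro d hf h2
    rw [pcpDivLoop]
    by_cases hg : d * d ≤ m
    · rw [dif_pos ⟨hg, h2⟩]
      by_cases hd : d ∣ m
      · have hm0 : (PySem.Int.mod m d == 0) = true := by
          rw [(PySem.Int.mod_eq_zero_iff_dvd m d).mpr hd]
          rfl
        rw [if_pos hm0]
        simp only [Bool.false_eq_true, false_iff]
        intro H
        exact H d le_rfl hg hd
      · have hm0 : (PySem.Int.mod m d == 0) = false := by
          rw [beq_eq_false_iff_ne, Ne]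
          exact fun h => hd ((PySem.Int.mod_eq_zero_iff_dvd m d).mp h)
        rw [if_neg (by rw [hm0]; simp)]
        rw [ih (d + 1) (by omega) (by omega)]
        constructor
        · intro H e he hee hdvd
          rcases eq_or_lt_of_le he with heq | hlt
          · exact hd (heq ▸ hdvd)
          · exact H e (by omega) hee hdvd
        · intro H e he hee hdvd
          exact H e (by omega) hee hdvd
    · rw [dif_neg (fun hh => hg hh.1)]
      simp only [true_iff]
      intro e he hee hdvd
      have : d * d ≤ e * e := mul_le_mul he he (by omega) (by omega)
      omega

lemma pcp_isPrime_iff (m : Int) :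
    pcpIsPrime m = true ↔ (2 ≤ m ∧ ∀ e : Int, 2 ≤ e → e * e ≤ m → ¬ e ∣ m) := by
  unfold pcpIsPrime
  split_ifs with h
  · simp only [false_iff]
    rintro ⟨h2, _⟩
    omega
  · rw [pcp_divLoop_iff m (m - 2).toNat 2 le_rfl le_rfl]
    constructor
    · intro H
      exact ⟨by omega, H⟩
    · rintro ⟨_, H⟩
      exact H

lemma pcp_P_iff (x : Int) (_h2 : 2 ≤ x) :
    pcpP x ↔ ∀ e : Int, 2 ≤ e → e * e ≤ x → ¬ e ∣ x := by
  unfold pcpP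
  constructor
  · intro H e he hee hdvd
    by_cases hex : e < x
    · exact H e he hex hee hdvd
    · have hle : e ≤ x := Int.le_of_dvd (by omega) hdvd
      have hx : e = x := by omega
      subst hx
      nlinarith
  · intro H p hp _ hpp hpd
    exact H p hp hpp hpd

lemma pcp_contains_iff (s : PySem.Set Int) (x : Int) :
    PySem.Set.contains s x = true ↔ x ∈ s := by
  simp [PySem.Set.contains]

lemma pcp_candidate (n t : Int) (hn : 1 ≤ n) (_h2 : 2 ≤ t) (htn : t ≤ n) :
    (PySem.Set.contains (PySem.Set.ofList (sieve (n + 1))) t) = pcpIsPrime t := by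
  rw [Bool.eq_iff_iff, pcp_contains_iff, PySem.Set.mem_ofList,
    pcp_sieve_mem (n + 1) (by omega), pcp_isPrime_iff]
  constructor
  · rintro ⟨a, _, d⟩
    exact ⟨a, (pcp_P_iff t a).mp d⟩
  · rintro ⟨a, d⟩
    exact ⟨a, by omega, (pcp_P_iff t a).mpr d⟩

lemma pcp_align (n : Int) (hn : 1 ≤ n) :
    ∀ (fuel : Nat) (k total : Int), 1 ≤ k →
      (n + 1 - (3 * k * k + 3 * k + 1)).toNat ≤ fuel →
      pcpLoopA (PySem.Set.ofList (sieve (n + 1))) n (3 * k * k + 3 * k + 1)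
          (6 * k + 6) total
        = pcpLoopB n k total := by
  intro fuel
  induction fuel with
  | zero =>
    intro k total hk hf
    have ht : n < 3 * k * k + 3 * k + 1 := by
      obtain ⟨q, hq⟩ : ∃ q, 3 * k * k + 3 * k + 1 = q := ⟨_, rfl⟩
      rw [hq] at hf ⊢
      omega
    rw [pcpLoopA, pcpLoopB, dif_neg (fun hh => absurd hh.1 (not_le.mpr ht)),
      dif_neg (fun hh => absurd hh.1 (not_le.mpr ht))]
  | succ f ih =>
    intro k total hk hf
    rw [pcpLoopA, pcpLoopB]
    by_cases hle : 3 * k * k + 3 * k + 1 ≤ n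
    · rw [dif_pos ⟨hle, by omega⟩, dif_pos ⟨hle, by omega⟩]
      rw [pcp_candidate n _ hn (by nlinarith) hle]
      have harg : 3 * k * k + 3 * k + 1 + (6 * k + 6)
          = 3 * (k + 1) * (k + 1) + 3 * (k + 1) + 1 := by ring
      have hincr : 6 * k + 6 + 6 = 6 * (k + 1) + 6 := by ring
      rw [harg, hincr]
      refine ih (k + 1) _ (by omega) ?_
      have e : 3 * (k + 1) * (k + 1) + 3 * (k + 1) + 1
          = 3 * k * k + 3 * k + 1 + (6 * k + 6) := by ring
      rw [e]
      obtain ⟨q, hq⟩ : ∃ q, 3 * k * k + 3 * k + 1 = q := ⟨_, rfl⟩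
      rw [hq] at hf ⊢
      omega
    · rw [dif_neg (fun hh => hle hh.1), dif_neg (fun hh => hle hh.1)]

lemma pcp_one_not_mem (n : Int) (hn : 1 ≤ n) :
    PySem.Set.contains (PySem.Set.ofList (sieve (n + 1))) 1 = false := by
  rw [Bool.eq_false_iff, Ne, pcp_contains_iff, PySem.Set.mem_ofList,
    pcp_sieve_mem (n + 1) (by omega)]
  rintro ⟨h2, _⟩
  omega

-- ===== VERDICT (by name: the statement is the Claim_ definition above) =====
theorem prime_cube_pairs_spec : Claim_equal_prime_cube_pairs := by
  intro n _ hpre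
  show prime_cube_pairs n = prime_cube_pairs_alt n
  unfold prime_cube_pairs prime_cube_pairs_alt
  rw [pcpLoopA, dif_pos ⟨hpre, by norm_num⟩, pcp_one_not_mem n hpre]
  have h := pcp_align n hpre (n + 1 - (3 * 1 * 1 + 3 * 1 + 1)).toNat 1 0 le_rfl le_rfl
  norm_num at h ⊢
  exact h
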